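-- pv_equiv track=rewrite | github.com/UtkarshDDwivedi/NaagrikAI | backend/app/services/predictor.py | build_feature_vector
-- ===== SOURCE A (Python) =====
-- CRITICAL_DOCUMENTS = {
--     "forest_noc",
--     "environment_clearance",
--     "land_document",
--     "income_certificate",
--     "aadhaar_card",
--     "caste_certificate",
--     "passbook",
-- }
--
-- def build_feature_vector(
--     missing_documents: list[str],
--     mismatches: list[str],
--     compliance_issues: list[str],
--     required_document_count: int,
-- ) -> dict[str, int]:
--     normalized_missing = {item.strip().lower() for item in missing_documents}
--     mismatch_total = len(mismatches)
--     critical_missing = sum(1 for item in normalized_missing if item in CRITICAL_DOCUMENTS)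
--     compliance_total = len(compliance_issues)
--     ocr_failure_count = sum(1 for item in compliance_issues if "ocr failed" in item.lower())
--     unreadable_document_count = sum(1 for item in compliance_issues if "could not be read clearly" in item.lower())
--
--     return {
--         "required_document_count": required_document_count,
--         "missing_document_count": len(normalized_missing),
--         "mismatch_count": mismatch_total,
--         "compliance_issue_count": compliance_total,
--         "critical_missing_count": critical_missing,
--         "ocr_failure_count": ocr_failure_count,
--         "unreadable_document_count": unreadable_document_count,
--         "has_address_mismatch": int(any("address mismatch" in item.lower() for item in mismatches)),
--         "has_name_mismatch": int(any("name mismatch" in item.lower() for item in mismatches)),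
--     }
-- ===== SOURCE B (Python) =====
-- CRITICAL_DOCUMENTS = {
--     "forest_noc",
--     "environment_clearance",
--     "land_document",
--     "income_certificate",
--     "aadhaar_card",
--     "caste_certificate",
--     "passbook",
-- }
--
-- # Declarative rules table: (source list, substring to look for, event tag emitted).
-- FEATURE_RULES = [
--     ("compliance", "ocr failed", "ocr_failure"),
--     ("compliance", "could not be read clearly", "unreadable_document"),
--     ("mismatch", "address mismatch", "address"),
--     ("mismatch", "name mismatch", "name"),
-- ]
--
-- def build_feature_vector(
--     missing_documents: list[str],
--     mismatches: list[str],
--     compliance_issues: list[str],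
--     required_document_count: int,
-- ) -> dict[str, int]:
--     # ordered dedup of the normalized missing documents
--     normalized = list(dict.fromkeys(item.strip().lower() for item in missing_documents))
--     # sweep the rules table, emitting event tags into one stream
--     sources = {"compliance": compliance_issues, "mismatch": mismatches}
--     events = []
--     for source, needle, tag in FEATURE_RULES:
--         for item in sources[source]:
--             if needle in item.lower():
--                 events.append(tag)
--     for key in normalized:
--         if key in CRITICAL_DOCUMENTS:
--             events.append("critical")
--     # every feature is read off the event stream by counting its tag
--     return {
--         "required_document_count": required_document_count,
--         "missing_document_count": len(normalized),
--         "mismatch_count": len(mismatches),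
--         "compliance_issue_count": len(compliance_issues),
--         "critical_missing_count": events.count("critical"),
--         "ocr_failure_count": events.count("ocr_failure"),
--         "unreadable_document_count": events.count("unreadable_document"),
--         "has_address_mismatch": min(events.count("address"), 1),
--         "has_name_mismatch": min(events.count("name"), 1),
--     }
-- ===== Notes on version B (the rewrite author's own statement) =====
-- stated objective: alternative
-- what changed: A's hardcoded per-feature scans are replaced by a table-driven design: a declarative rules table (source list, substring, tag) is swept to emit event tags into one stream plus critical-tags from an ordered dedup of missing documents, and every feature is then read off the stream by counting its tag (booleans as min(count,1)).
import Mathlib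
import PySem

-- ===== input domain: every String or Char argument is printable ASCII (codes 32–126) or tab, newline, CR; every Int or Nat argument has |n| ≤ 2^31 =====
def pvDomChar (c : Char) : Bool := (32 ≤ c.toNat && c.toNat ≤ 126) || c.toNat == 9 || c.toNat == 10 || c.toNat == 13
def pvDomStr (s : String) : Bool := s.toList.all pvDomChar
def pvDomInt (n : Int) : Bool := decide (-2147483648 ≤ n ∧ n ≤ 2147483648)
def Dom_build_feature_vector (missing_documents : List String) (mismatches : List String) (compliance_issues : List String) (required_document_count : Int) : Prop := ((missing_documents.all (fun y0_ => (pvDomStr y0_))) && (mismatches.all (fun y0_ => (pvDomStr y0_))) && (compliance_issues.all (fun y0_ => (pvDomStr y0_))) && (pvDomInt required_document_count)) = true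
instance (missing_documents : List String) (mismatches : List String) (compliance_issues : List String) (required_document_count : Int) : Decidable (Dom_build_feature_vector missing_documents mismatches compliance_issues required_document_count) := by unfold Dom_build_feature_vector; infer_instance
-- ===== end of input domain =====

-- B replaces A's hardcoded per-feature scans by a table-driven design: a rules table is swept
-- to emit event tags into one stream, and each feature is read off by counting its tag.

-- ===== PORT A =====
def CRITICAL_DOCUMENTS : List String :=
  ["forest_noc", "environment_clearance", "land_document", "income_certificate",
   "aadhaar_card", "caste_certificate", "passbook"]

def build_feature_vector (missing_documents : List String) (mismatches : List String) (compliance_issues : List String) (required_document_count : Int) : List (String × Int) :=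
  let normalized_missing : PySem.Set String :=
    PySem.Set.ofList (missing_documents.map (fun item => PySem.Str.lower (PySem.Str.strip item)))
  let mismatch_total : Int := mismatches.length
  let critical_missing : Int :=
    ((normalized_missing.filter (fun item => CRITICAL_DOCUMENTS.contains item)).map (fun _ => (1 : Int))).sum
  let compliance_total : Int := compliance_issues.length
  let ocr_failure_count : Int :=
    ((compliance_issues.filter (fun item => PySem.Str.isIn "ocr failed" (PySem.Str.lower item))).map (fun _ => (1 : Int))).sum
  let unreadable_document_count : Int :=
    ((compliance_issues.filter (fun item => PySem.Str.isIn "could not be read clearly" (PySem.Str.lower item))).map (fun _ => (1 : Int))).sum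
  [("required_document_count", required_document_count),
   ("missing_document_count", (normalized_missing.length : Int)),
   ("mismatch_count", mismatch_total),
   ("compliance_issue_count", compliance_total),
   ("critical_missing_count", critical_missing),
   ("ocr_failure_count", ocr_failure_count),
   ("unreadable_document_count", unreadable_document_count),
   ("has_address_mismatch", if mismatches.any (fun item => PySem.Str.isIn "address mismatch" (PySem.Str.lower item)) then 1 else 0),
   ("has_name_mismatch", if mismatches.any (fun item => PySem.Str.isIn "name mismatch" (PySem.Str.lower item)) then 1 else 0)]

-- ===== PORT B =====
def CRITICAL_DOCUMENTS_alt : List String :=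
  ["forest_noc", "environment_clearance", "land_document", "income_certificate",
   "aadhaar_card", "caste_certificate", "passbook"]

-- (source list, substring to look for, event tag emitted)
def FEATURE_RULES : List (String × String × String) :=
  [("compliance", "ocr failed", "ocr_failure"),
   ("compliance", "could not be read clearly", "unreadable_document"),
   ("mismatch", "address mismatch", "address"),
   ("mismatch", "name mismatch", "name")]

def build_feature_vector_alt (missing_documents : List String) (mismatches : List String) (compliance_issues : List String) (required_document_count : Int) : List (String × Int) :=
  -- ordered dedup of the normalized missing documents (list(dict.fromkeys(...)))
  let normalized : List String :=
    PySem.List.dedup (missing_documents.map (fun item => PySem.Str.lower (PySem.Str.strip item)))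
  let sources : PySem.Dict String (List String) :=
    PySem.Dict.ofList [("compliance", compliance_issues), ("mismatch", mismatches)]
  -- sources[source]: both keys of the rules table are present, so getD with [] is exact here
  let events : List String :=
    FEATURE_RULES.foldl (fun ev r =>
      (sources.getD r.1 []).foldl (fun ev item =>
        if PySem.Str.isIn r.2.1 (PySem.Str.lower item) then ev ++ [r.2.2] else ev) ev) []
  let events2 : List String :=
    normalized.foldl (fun ev key =>
      if CRITICAL_DOCUMENTS_alt.contains key then ev ++ ["critical"] else ev) events
  [("required_document_count", required_document_count),
   ("missing_document_count", (normalized.length : Int)),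
   ("mismatch_count", (mismatches.length : Int)),
   ("compliance_issue_count", (compliance_issues.length : Int)),
   ("critical_missing_count", ((events2.count "critical" : Nat) : Int)),
   ("ocr_failure_count", ((events2.count "ocr_failure" : Nat) : Int)),
   ("unreadable_document_count", ((events2.count "unreadable_document" : Nat) : Int)),
   ("has_address_mismatch", min ((events2.count "address" : Nat) : Int) 1),
   ("has_name_mismatch", min ((events2.count "name" : Nat) : Int) 1)]

-- ===== PRECONDITION & SPEC =====
def Spec_build_feature_vector (missing_documents : List String) (mismatches : List String) (compliance_issues : List String) (required_document_count : Int) (out : List (String × Int)) : Prop := out = build_feature_vector_alt missing_documents mismatches compliance_issues required_document_count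
instance (missing_documents : List String) (mismatches : List String) (compliance_issues : List String) (required_document_count : Int) (out : List (String × Int)) : Decidable (Spec_build_feature_vector missing_documents mismatches compliance_issues required_document_count out) := by unfold Spec_build_feature_vector; infer_instance

-- ===== CLAIM (what is proved, stated in full; the proofs are below) =====
def Claim_equal_build_feature_vector : Prop := ∀ (missing_documents : List String) (mismatches : List String) (compliance_issues : List String) (required_document_count : Int), Dom_build_feature_vector missing_documents mismatches compliance_issues required_document_count → Spec_build_feature_vector missing_documents mismatches compliance_issues required_document_count (build_feature_vector missing_documents mismatches compliance_issues required_document_count)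

-- ===== LEMMAS AND PROOFS =====

-- a map-to-constant list's sum of ones is its length
theorem sum_map_one (l : List String) : ((l.map (fun _ => (1 : Int))).sum) = (l.length : Int) := by
  induction l with
  | nil => simp
  | cons x xs ih => simp; omega

-- counting a tag in a constant-mapped segment
theorem count_map_const (l : List String) (t t' : String) :
    (l.map (fun _ => t)).count t' = if t' = t then l.length else 0 := by
  induction l with
  | nil => simp
  | cons x xs ih =>
    by_cases h : t' = t
    · simp [h]
    · simp only [List.map_cons, List.count_cons, ih, if_neg h]
      have : (t == t') = false := by simpa using fun hh => h hh.symm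
      simp [this]

-- 'int(any(...))' equals 'min(count, 1)' over the matching segment
theorem any_eq_min_count (l : List String) (p : String → Bool) :
    (if l.any p then (1 : Int) else 0) = min (((l.filter p).length : Nat) : Int) 1 := by
  cases h : l.any p
  · have hf : l.filter p = [] := by
      simp only [List.filter_eq_nil_iff]
      intro a ha
      have := (List.any_eq_false).mp h a ha
      simp [this]
    simp [hf]
  · have ⟨a, ha, hpa⟩ := List.any_eq_true.mp h
    have hne : l.filter p ≠ [] := by
      intro hc
      exact absurd hpa (by simpa using (List.filter_eq_nil_iff.mp hc) a ha)
    have hlen : 1 ≤ (l.filter p).length := List.length_pos_iff.mpr hne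
    have : (1 : Int) ≤ ((l.filter p).length : Int) := by exact_mod_cast hlen
    simp [min_eq_right this]

-- ===== VERDICT (by name: the statement is the Claim_ definition above) =====
theorem build_feature_vector_spec : Claim_equal_build_feature_vector := by
  intro md mm ci rdc _
  unfold Spec_build_feature_vector build_feature_vector build_feature_vector_alt
  simp only [FEATURE_RULES, List.foldl_cons, List.foldl_nil,
             PySem.List.foldl_append_if]
  have hc : (PySem.Dict.ofList [("compliance", ci), ("mismatch", mm)]).getD "compliance" [] = ci := by
    simp [PySem.Dict.ofList, PySem.Dict.update, PySem.Dict.getD_insert]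
  have hm : (PySem.Dict.ofList [("compliance", ci), ("mismatch", mm)]).getD "mismatch" [] = mm := by
    simp [PySem.Dict.ofList, PySem.Dict.update]
  simp only [hc, hm, List.nil_append, List.count_append, count_map_const,
             sum_map_one, PySem.List.dedup_eq_ofList, CRITICAL_DOCUMENTS,
             CRITICAL_DOCUMENTS_alt]
  simp only [any_eq_min_count]
  simp
  congr 1
  apply List.filter_congr
  intro x _
  simp
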